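-- pv_equiv track=rewrite | github.com/GDevelopApp/GDevelop-documentation | dokuwiki2wikijs/dokuwiki2wikijs.py | fix_lists_needing_extra_spacing
-- ===== SOURCE A (Python) =====
-- def fix_lists_needing_extra_spacing(lines):
--     new_lines = []
--     last_line_was_list = False
--     last_line_was_spacing = False
--     for i, line in enumerate(lines):
--         trimmed_line = line.strip()
--         is_list = trimmed_line.startswith("- ") or trimmed_line.startswith("* ")
--         is_top_level_list = line.startswith("- ") or line.startswith("* ")
--         is_spacing = len(trimmed_line) == 0
--
--         if is_list:
--             if last_line_was_list:
--                 # We continue a list, all good.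
--                 pass
--             elif last_line_was_spacing:
--                 # We continue a list or start one after spacing, which is safe
--                 # even if the list if not a proper top level list.
--                 pass
--             elif is_top_level_list:
--                 # We start a list, but it's top level so properly handled (even
--                 # if no spacing before).
--                 pass
--             else:
--                 # We start a list, but it's not a top level list and there was no spacing before.
--                 # Add spacing:
--                 new_lines.append("")
--
--         last_line_was_list = is_list
--         last_line_was_spacing = is_spacing
--         new_lines.append(line)
--
--     return new_lines
-- ===== SOURCE B (Python) =====
-- def fix_lists_needing_extra_spacing(lines):
--     # Pass 1: compute the indices that need a blank line inserted before them.
--     def needs_blank(i):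
--         line = lines[i]
--         trimmed = line.strip()
--         if not ((trimmed.startswith("- ") or trimmed.startswith("* "))
--                 and not (line.startswith("- ") or line.startswith("* "))):
--             return False
--         if i == 0:
--             return True
--         prev = lines[i - 1].strip()
--         return not (prev.startswith("- ") or prev.startswith("* ")) and len(prev) != 0
--
--     cuts = [i for i in range(len(lines)) if needs_blank(i)]
--
--     # Pass 2: splice the input at those indices, joining slices with "".
--     out = []
--     start = 0
--     for c in cuts:
--         out += lines[start:c] + [""]
--         start = c
--     out += lines[start:]
--     return out
-- ===== Notes on version B (the rewrite author's own statement) =====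
-- stated objective: alternative
-- what changed: B is two staged passes instead of A's single stateful loop: pass 1 computes the list of cut indices that need a blank (classifying each line and its predecessor by direct lookback), pass 2 rebuilds the output by splicing slices of the input joined with blank lines.
import Mathlib
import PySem

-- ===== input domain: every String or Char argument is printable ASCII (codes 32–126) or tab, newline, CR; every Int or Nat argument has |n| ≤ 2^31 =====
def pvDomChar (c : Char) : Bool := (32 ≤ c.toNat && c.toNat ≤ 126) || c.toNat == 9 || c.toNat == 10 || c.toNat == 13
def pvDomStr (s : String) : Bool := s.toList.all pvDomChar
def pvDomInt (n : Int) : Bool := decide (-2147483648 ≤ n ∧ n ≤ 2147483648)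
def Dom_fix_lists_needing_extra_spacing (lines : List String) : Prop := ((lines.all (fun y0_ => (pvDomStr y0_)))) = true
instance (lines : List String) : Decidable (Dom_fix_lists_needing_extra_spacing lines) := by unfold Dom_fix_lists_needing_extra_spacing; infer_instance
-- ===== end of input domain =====

-- B replaces A's single stateful loop by two staged passes — compute the cut indices,
-- then splice the input at them — a different decomposition of the same task (objective: alternative).

-- ===== PORT A =====
-- A's loop body: state = (last_line_was_list, last_line_was_spacing, new_lines); the
-- nested if/elif/else with `pass` branches is kept branch for branch.
def fix_step (st : Bool × Bool × List String) (line : String) : Bool × Bool × List String :=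
  let lastList := st.1
  let lastSpacing := st.2.1
  let newLines := st.2.2
  let trimmed := PySem.Str.strip line
  let isList := PySem.Str.startswith trimmed "- " || PySem.Str.startswith trimmed "* "
  let isTop := PySem.Str.startswith line "- " || PySem.Str.startswith line "* "
  let isSpacing := PySem.Str.len trimmed == 0
  let newLines :=
    if isList then
      if lastList then newLines
      else if lastSpacing then newLines
      else if isTop then newLines
      else newLines ++ [""]
    else newLines
  (isList, isSpacing, newLines ++ [line])

def fix_lists_needing_extra_spacing (lines : List String) : List String :=
  (lines.foldl fix_step (false, false, [])).2.2

-- ===== PORT B =====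
-- pass 1 classifier: does line i need a blank inserted before it?  lines[i] / lines[i-1]
-- are indexed with getD "", exact here since every call has 0 ≤ i < lines.length.
def needs_blank (lines : List String) (i : Nat) : Bool :=
  let line := lines.getD i ""
  let trimmed := PySem.Str.strip line
  if !((PySem.Str.startswith trimmed "- " || PySem.Str.startswith trimmed "* ") &&
       !(PySem.Str.startswith line "- " || PySem.Str.startswith line "* ")) then false
  else if i == 0 then true
  else
    let prev := PySem.Str.strip (lines.getD (i - 1) "")
    !(PySem.Str.startswith prev "- " || PySem.Str.startswith prev "* ") &&
      !(PySem.Str.len prev == 0)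

-- pass 2: fold over the cuts with state (start, out); lines[start:c] is an exact
-- nonnegative slice, and the final lines[start:] (0 ≤ start) is drop start.
def fix_lists_needing_extra_spacing_alt (lines : List String) : List String :=
  let cuts := (List.range lines.length).filter (needs_blank lines)
  let fin := cuts.foldl
    (fun (st : Nat × List String) c =>
      (c, st.2 ++ PySem.List.slice lines (some (st.1 : Int)) (some (c : Int)) ++ [""]))
    (0, [])
  fin.2 ++ lines.drop fin.1

-- ===== PRECONDITION & SPEC =====
def Spec_fix_lists_needing_extra_spacing (lines : List String) (out : List String) : Prop := out = fix_lists_needing_extra_spacing_alt lines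
instance (lines : List String) (out : List String) : Decidable (Spec_fix_lists_needing_extra_spacing lines out) := by unfold Spec_fix_lists_needing_extra_spacing; infer_instance

-- ===== CLAIM (what is proved, stated in full; the proofs are below) =====
def Claim_equal_fix_lists_needing_extra_spacing : Prop := ∀ (lines : List String), Dom_fix_lists_needing_extra_spacing lines → Spec_fix_lists_needing_extra_spacing lines (fix_lists_needing_extra_spacing lines)

-- ===== LEMMAS AND PROOFS =====

-- the chunk line i contributes to the canonical output
def pvChunk (lines : List String) (i : Nat) : List String :=
  (if needs_blank lines i then [""] else []) ++ [lines.getD i ""]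

-- the optional predecessor of index j
def pvPrev (lines : List String) (j : Nat) : Option String :=
  if j = 0 then none else some (lines.getD (j - 1) "")

-- A's accumulator flags as a function of the predecessor
def pvFlags (prev : Option String) : Bool × Bool :=
  match prev with
  | none => (false, false)
  | some pr =>
    let ps := PySem.Str.strip pr
    (PySem.Str.startswith ps "- " || PySem.Str.startswith ps "* ", PySem.Str.len ps == 0)

-- recursive mirror of B's pass-2 fold
def pvSplice (lines : List String) (start : Nat) : List Nat → List String
  | [] => lines.drop start
  | c :: cuts => (lines.drop start).take (c - start) ++ [""] ++ pvSplice lines c cuts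

theorem drop_eq_map_range' (lines : List String) (a : Nat) (ha : a ≤ lines.length) :
    lines.drop a = (List.range' a (lines.length - a)).map (fun i => lines.getD i "") := by
  apply List.ext_getElem
  · simp
  · intro i h1 h2
    simp only [List.getElem_drop, List.getElem_map, List.getElem_range', one_mul]
    rw [List.getD_eq_getElem lines "" (by simp at h1; omega)]

theorem take_drop_eq_map_range' (lines : List String) (a b : Nat)
    (hab : a ≤ b) (hb : b ≤ lines.length) :
    (lines.drop a).take (b - a) = (List.range' a (b - a)).map (fun i => lines.getD i "") := by
  apply List.ext_getElem
  · simp; omega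
  · intro i h1 h2
    simp only [List.getElem_take, List.getElem_drop, List.getElem_map, List.getElem_range', one_mul]
    rw [List.getD_eq_getElem lines "" (by simp at h1; omega)]

theorem splice_filter (lines : List String) (p : Nat → Bool) :
    ∀ (n a b : Nat), b + n = lines.length → a ≤ b →
    pvSplice lines a ((List.range' b n).filter p)
      = (List.range' a (b - a)).map (fun i => lines.getD i "")
        ++ (List.range' b n).flatMap
            (fun i => (if p i then [""] else []) ++ [lines.getD i ""]) := by
  intro n
  induction n with
  | zero =>
    intro a b hb hab
    have ha : a ≤ lines.length := by omega
    simp only [List.range'_zero, List.filter_nil, pvSplice, List.flatMap_nil, List.append_nil]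
    have h2 : lines.length - a = b - a := by omega
    rw [drop_eq_map_range' lines a ha, h2]
  | succ n ih =>
    intro a b hb hab
    rw [List.range'_succ, List.filter_cons, List.flatMap_cons]
    by_cases hp : p b
    · simp only [hp, if_true]
      show pvSplice lines a (b :: _) = _
      simp only [pvSplice]
      rw [ih b (b + 1) (by omega) (by omega)]
      rw [take_drop_eq_map_range' lines a b hab (by omega)]
      have h1 : b + 1 - b = 1 := by omega
      simp [h1, List.range'_one]
    · simp only [hp, Bool.false_eq_true, if_false]
      rw [ih a (b + 1) (by omega) (by omega)]
      have h1 : List.range' a (b + 1 - a) = List.range' a (b - a) ++ [b] := by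
        have h2 : b + 1 - a = (b - a) + 1 := by omega
        rw [h2, List.range'_concat]
        congr 2
        omega
      simp [h1]

-- B's fold over the cuts equals the recursive splice (slice_natCast needs no bounds)
theorem fold_eq_splice (lines : List String) :
    ∀ (cuts : List Nat) (start : Nat) (out : List String),
      (cuts.foldl
        (fun (st : Nat × List String) c =>
          (c, st.2 ++ PySem.List.slice lines (some (st.1 : Int)) (some (c : Int)) ++ [""]))
        (start, out)).2
        ++ lines.drop (cuts.foldl
        (fun (st : Nat × List String) c =>
          (c, st.2 ++ PySem.List.slice lines (some (st.1 : Int)) (some (c : Int)) ++ [""]))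
        (start, out)).1
      = out ++ pvSplice lines start cuts := by
  intro cuts
  induction cuts with
  | nil => intro start out; simp [pvSplice]
  | cons c cuts ih =>
    intro start out
    simp only [List.foldl_cons, pvSplice]
    rw [ih c (out ++ PySem.List.slice lines (some (start : Int)) (some (c : Int)) ++ [""])]
    rw [PySem.List.slice_natCast]
    simp

-- A's per-step action, expressed with the predecessor's flags
def fix_emit (p : Option String × String) : List String :=
  let prev := p.1
  let line := p.2
  let trimmed := PySem.Str.strip line
  let isList := PySem.Str.startswith trimmed "- " || PySem.Str.startswith trimmed "* "
  let isTop := PySem.Str.startswith line "- " || PySem.Str.startswith line "* "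
  let prevFlags := pvFlags prev
  (if isList && !isTop && !prevFlags.1 && !prevFlags.2 then [""] else []) ++ [line]

theorem fix_step_eq (prev : Option String) (acc : List String) (x : String) :
    fix_step ((pvFlags prev).1, (pvFlags prev).2, acc) x
      = ((pvFlags (some x)).1, (pvFlags (some x)).2, acc ++ fix_emit (prev, x)) := by
  simp only [fix_step, fix_emit, pvFlags]
  cases prev with
  | none =>
    cases hL : (PySem.Str.startswith (PySem.Str.strip x) "- " || PySem.Str.startswith (PySem.Str.strip x) "* ") <;>
      cases hT : (PySem.Str.startswith x "- " || PySem.Str.startswith x "* ") <;>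
        simp_all
  | some pr =>
    cases hL : (PySem.Str.startswith (PySem.Str.strip x) "- " || PySem.Str.startswith (PySem.Str.strip x) "* ") <;>
      cases hT : (PySem.Str.startswith x "- " || PySem.Str.startswith x "* ") <;>
        cases hPL : (PySem.Str.startswith (PySem.Str.strip pr) "- " || PySem.Str.startswith (PySem.Str.strip pr) "* ") <;>
          cases hPS : (PySem.Str.len (PySem.Str.strip pr) == 0) <;>
                simp_all <;> (intro h; rcases hPL with h1 | h1 <;> simp_all)

theorem emit_eq_chunk (lines : List String) (j : Nat) :
    fix_emit (pvPrev lines j, lines.getD j "") = pvChunk lines j := by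
  simp only [fix_emit, pvChunk, needs_blank, pvPrev]
  by_cases h0 : j = 0
  · subst h0
    simp only [if_pos rfl, pvFlags]
    cases hL : (PySem.Str.startswith (PySem.Str.strip (lines.getD 0 "")) "- " || PySem.Str.startswith (PySem.Str.strip (lines.getD 0 "")) "* ") <;>
      cases hT : (PySem.Str.startswith (lines.getD 0 "") "- " || PySem.Str.startswith (lines.getD 0 "") "* ") <;>
        simp [hL, hT]
  · simp only [if_neg h0, pvFlags, beq_iff_eq]
    cases hL : (PySem.Str.startswith (PySem.Str.strip (lines.getD j "")) "- " || PySem.Str.startswith (PySem.Str.strip (lines.getD j "")) "* ") <;>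
      cases hT : (PySem.Str.startswith (lines.getD j "") "- " || PySem.Str.startswith (lines.getD j "") "* ") <;>
        cases hPL : (PySem.Str.startswith (PySem.Str.strip (lines.getD (j - 1) "")) "- " || PySem.Str.startswith (PySem.Str.strip (lines.getD (j - 1) "")) "* ") <;>
          cases hPS : (PySem.Str.len (PySem.Str.strip (lines.getD (j - 1) "")) == 0) <;>
            simp [hL, hT, hPL, hPS, h0]

theorem a_fold (lines : List String) :
    ∀ (n j : Nat) (acc : List String), j + n = lines.length →
    ((((List.range' j n).map (fun i => lines.getD i "")).foldl fix_step
        ((pvFlags (pvPrev lines j)).1, (pvFlags (pvPrev lines j)).2, acc))).2.2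
      = acc ++ (List.range' j n).flatMap (pvChunk lines) := by
  intro n
  induction n with
  | zero => intro j acc _; simp
  | succ n ih =>
    intro j acc hj
    rw [List.range'_succ, List.map_cons, List.foldl_cons, List.flatMap_cons]
    rw [fix_step_eq]
    have hpv : pvFlags (some (lines.getD j "")) = pvFlags (pvPrev lines (j + 1)) := by
      simp [pvPrev]
    rw [hpv, ih (j + 1) _ (by omega)]
    rw [emit_eq_chunk lines j]
    simp

-- ===== VERDICT (by name: the statement is the Claim_ definition above) =====
theorem fix_lists_needing_extra_spacing_spec : Claim_equal_fix_lists_needing_extra_spacing := by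
  intro lines _
  unfold Spec_fix_lists_needing_extra_spacing fix_lists_needing_extra_spacing fix_lists_needing_extra_spacing_alt
  have hB := fold_eq_splice lines ((List.range lines.length).filter (needs_blank lines)) 0 []
  have hS := splice_filter lines (needs_blank lines) lines.length 0 0 (by omega) (le_refl 0)
  have hA := a_fold lines lines.length 0 [] (by omega)
  have hlines : (List.range' 0 lines.length).map (fun i => lines.getD i "") = lines := by
    have := drop_eq_map_range' lines 0 (by omega)
    simpa using this.symm
  simp only [List.range_eq_range'] at hB ⊢
  rw [hB, hS]
  rw [show pvFlags (pvPrev lines 0) = (false, false) by simp [pvPrev, pvFlags]] at hA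
  rw [hlines] at hA
  simp only [Nat.sub_zero] at hS ⊢
  rw [hA]
  have hc : pvChunk lines = fun i => (if needs_blank lines i then [""] else []) ++ [lines[i]?.getD ""] := by
    funext i
    simp [pvChunk, List.getD]
  rw [hc]
  simp
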